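-- pv_equiv track=rewrite | github.com/KubaO/python-safethread-archive | cpython/Lib/subprocess.py | list2cmdline
-- ===== SOURCE A (Python) =====
-- def list2cmdline(seq):
--     """
--     Translate a sequence of arguments into a command line
--     string, using the same rules as the MS C runtime:
--
--     1) Arguments are delimited by white space, which is either a
--        space or a tab.
--
--     2) A string surrounded by double quotation marks is
--        interpreted as a single argument, regardless of white space
--        or pipe characters contained within.  A quoted string can be
--        embedded in an argument.
--
--     3) A double quotation mark preceded by a backslash is
--        interpreted as a literal double quotation mark.
--
--     4) Backslashes are interpreted literally, unless they
--        immediately precede a double quotation mark.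
--
--     5) If backslashes immediately precede a double quotation mark,
--        every pair of backslashes is interpreted as a literal
--        backslash.  If the number of backslashes is odd, the last
--        backslash escapes the next double quotation mark as
--        described in rule 3.
--     """
--
--     # See
--     # http://msdn.microsoft.com/library/en-us/vccelng/htm/progs_12.asp
--     result = []
--     needquote = False
--     for arg in seq:
--         bs_buf = []
--
--         # Add a space to separate this argument from the others
--         if result:
--             result.append(' ')
--
--         needquote = (" " in arg) or ("\t" in arg) or ("|" in arg) or not arg
--         if needquote:
--             result.append('"')
--
--         for c in arg:
--             if c == '\\':
--                 # Don't know if we need to double yet.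
--                 bs_buf.append(c)
--             elif c == '"':
--                 # Double backslashes.
--                 result.append('\\' * len(bs_buf)*2)
--                 bs_buf = []
--                 result.append('\\"')
--             else:
--                 # Normal char
--                 if bs_buf:
--                     result.extend(bs_buf)
--                     bs_buf = []
--                 result.append(c)
--
--         # Add remaining backslashes, if any.
--         if bs_buf:
--             result.extend(bs_buf)
--
--         if needquote:
--             result.extend(bs_buf)
--             result.append('"')
--
--     return ''.join(result)
-- ===== SOURCE B (Python) =====
-- def list2cmdline(seq):
--     # Single right-to-left pass per argument: a boolean 'doubling' flag says
--     # whether the current backslash (scanning from the end) precedes a double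
--     # quote (or the closing quote of a quoted argument), replacing A's
--     # left-to-right pass with a backslash buffer and post-loop fixups.
--     out = []
--     for arg in seq:
--         needquote = (" " in arg) or ("\t" in arg) or ("|" in arg) or not arg
--         rev_pieces = []
--         doubling = needquote
--         for c in reversed(arg):
--             if c == '"':
--                 rev_pieces.append('\\"')
--                 doubling = True
--             elif c == '\\':
--                 rev_pieces.append('\\\\' if doubling else '\\')
--             else:
--                 rev_pieces.append(c)
--                 doubling = False
--         body = ''.join(reversed(rev_pieces))
--         if needquote:
--             body = '"' + body + '"'
--         out.append(body)
--     return ' '.join(out)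
-- ===== Notes on version B (the rewrite author's own statement) =====
-- stated objective: alternative
-- what changed: Replaces A's left-to-right scan with a backslash buffer (flushed/doubled at quotes and re-emitted at the end) by a single right-to-left scan per argument carrying one boolean flag that says whether the current backslash run precedes a double quote or the closing quote.
import Mathlib
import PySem

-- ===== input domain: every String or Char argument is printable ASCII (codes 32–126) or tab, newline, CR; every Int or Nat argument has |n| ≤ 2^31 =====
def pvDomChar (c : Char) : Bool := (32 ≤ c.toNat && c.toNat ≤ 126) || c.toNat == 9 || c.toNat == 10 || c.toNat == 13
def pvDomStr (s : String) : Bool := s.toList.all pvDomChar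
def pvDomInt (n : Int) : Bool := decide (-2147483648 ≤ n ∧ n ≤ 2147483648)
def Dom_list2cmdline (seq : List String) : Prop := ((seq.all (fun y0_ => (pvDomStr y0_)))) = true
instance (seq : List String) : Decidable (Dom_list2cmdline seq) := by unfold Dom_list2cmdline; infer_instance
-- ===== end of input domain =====

-- B changes the per-argument traversal (right-to-left with a boolean flag instead of
-- left-to-right with a backslash buffer); return values proved equal on all inputs.

-- needquote = (" " in arg) or ("\t" in arg) or ("|" in arg) or not arg   (identical in A and B)
def pvNeedquote (arg : List Char) : Bool :=
  PySem.Chars.isIn [' '] arg || PySem.Chars.isIn ['\t'] arg || PySem.Chars.isIn ['|'] arg || arg.isEmpty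

-- ===== PORT A =====
-- inner 'for c in arg' loop: state = (result suffix emitted, bs_buf)
def pvAInner : List Char → List Char → List Char → List Char × List Char
  | [], res, bs => (res, bs)
  | c :: rest, res, bs =>
    if c = '\\' then
      pvAInner rest res (bs ++ [c])
    else if c = '"' then
      pvAInner rest (res ++ List.replicate (2 * bs.length) '\\' ++ ['\\', '"']) []
    else
      pvAInner rest (if bs ≠ [] then res ++ bs ++ [c] else res ++ [c]) []

-- one iteration of 'for arg in seq'
def pvAStep (res : List Char) (arg : List Char) : List Char :=
  let res1 := if res ≠ [] then res ++ [' '] else res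
  let nq := pvNeedquote arg
  let res2 := if nq then res1 ++ ['"'] else res1
  let p := pvAInner arg res2 []
  let res3 := if p.2 ≠ [] then p.1 ++ p.2 else p.1
  if nq then res3 ++ p.2 ++ ['"'] else res3

def list2cmdline (seq : List String) : String :=
  String.mk (seq.foldl (fun res arg => pvAStep res arg.toList) [])

-- ===== PORT B =====
-- 'for c in reversed(arg)': state = (rev_pieces, doubling)
def pvBLoop (arg : List Char) (nq : Bool) : List (List Char) × Bool :=
  arg.reverse.foldl (fun st c =>
    if c = '"' then (st.1 ++ [['\\', '"']], true)
    else if c = '\\' then (st.1 ++ [if st.2 then ['\\', '\\'] else ['\\']], st.2)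
    else (st.1 ++ [[c]], false)) ([], nq)

def pvBPiece (arg : List Char) : List Char :=
  let nq := pvNeedquote arg
  let body := PySem.Chars.join [] (pvBLoop arg nq).1.reverse
  if nq then ['"'] ++ body ++ ['"'] else body

def list2cmdline_alt (seq : List String) : String :=
  String.mk (PySem.Chars.join [' '] (seq.map (fun a => pvBPiece a.toList)))

-- ===== PRECONDITION & SPEC =====
def Spec_list2cmdline (seq : List String) (out : String) : Prop := out = list2cmdline_alt seq
instance (seq : List String) (out : String) : Decidable (Spec_list2cmdline seq out) := by unfold Spec_list2cmdline; infer_instance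

-- ===== CLAIM (what is proved, stated in full; the proofs are below) =====
def Claim_equal_list2cmdline : Prop := ∀ (seq : List String), Dom_list2cmdline seq → Spec_list2cmdline seq (list2cmdline seq)

-- ===== LEMMAS AND PROOFS =====

-- proof-side structural form of B's right-to-left loop (body already flattened)
def pvBody : List Char → Bool → List Char × Bool
  | [], q => ([], q)
  | c :: rest, q =>
    let p := pvBody rest q
    if c = '"' then (['\\', '"'] ++ p.1, true)
    else if c = '\\' then ((if p.2 then ['\\', '\\'] else ['\\']) ++ p.1, p.2)
    else (c :: p.1, false)

theorem pvJoin_nil_flatten (parts : List (List Char)) :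
    PySem.Chars.join [] parts = parts.flatten := by
  induction parts with
  | nil => simp [PySem.Chars.join, List.intercalate]
  | cons p ps ih =>
    cases ps with
    | nil => simp [PySem.Chars.join, List.intercalate]
    | cons q qs =>
      rw [PySem.Chars.join_cons_cons]
      simp only [List.flatten_cons]
      rw [ih]
      simp

theorem pvBLoop_eq_pvBody (arg : List Char) (q : Bool) :
    PySem.Chars.join [] (pvBLoop arg q).1.reverse = (pvBody arg q).1 ∧
      (pvBLoop arg q).2 = (pvBody arg q).2 := by
  unfold pvBLoop
  rw [List.foldl_reverse]
  induction arg with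
  | nil => simp [pvBody, pvJoin_nil_flatten]
  | cons c rest ih =>
    obtain ⟨ih1, ih2⟩ := ih
    simp only [List.foldr_cons, pvBody]
    split_ifs with h1 h2 <;>
      simp_all [pvJoin_nil_flatten, pvBody]

-- step lemmas for the two per-character loops
theorem pvAInner_bs (rest res bs : List Char) :
    pvAInner ('\\' :: rest) res bs = pvAInner rest res (bs ++ ['\\']) := by
  simp [pvAInner]

theorem pvAInner_quote (rest res bs : List Char) :
    pvAInner ('"' :: rest) res bs
      = pvAInner rest (res ++ List.replicate (2 * bs.length) '\\' ++ ['\\', '"']) [] := by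
  simp [pvAInner]

theorem pvAInner_other (c : Char) (h1 : c ≠ '\\') (h2 : c ≠ '"') (rest res bs : List Char) :
    pvAInner (c :: rest) res bs
      = pvAInner rest (if bs ≠ [] then res ++ bs ++ [c] else res ++ [c]) [] := by
  simp [pvAInner, h1, h2]

theorem pvBody_bs (rest : List Char) (q : Bool) :
    pvBody ('\\' :: rest) q
      = ((if (pvBody rest q).2 then ['\\', '\\'] else ['\\']) ++ (pvBody rest q).1,
          (pvBody rest q).2) := by
  simp [pvBody]

theorem pvBody_quote (rest : List Char) (q : Bool) :
    pvBody ('"' :: rest) q = (['\\', '"'] ++ (pvBody rest q).1, true) := by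
  simp [pvBody]

theorem pvBody_other (c : Char) (h1 : c ≠ '\\') (h2 : c ≠ '"') (rest : List Char) (q : Bool) :
    pvBody (c :: rest) q = (c :: (pvBody rest q).1, false) := by
  simp [pvBody, h1, h2]

theorem pvAInner_prefix (cs : List Char) (pre bs : List Char) :
    pvAInner cs pre bs = (pre ++ (pvAInner cs [] bs).1, (pvAInner cs [] bs).2) := by
  induction cs generalizing pre bs with
  | nil => simp [pvAInner]
  | cons c rest ih =>
    by_cases h1 : c = '\\'
    · subst h1; rw [pvAInner_bs, pvAInner_bs, ih pre, ih []]
    · by_cases h2 : c = '"'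
      · subst h2
        rw [pvAInner_quote, pvAInner_quote,
          ih (pre ++ List.replicate (2 * bs.length) '\\' ++ ['\\', '"']),
          ih ([] ++ List.replicate (2 * bs.length) '\\' ++ ['\\', '"'])]
        simp
      · rw [pvAInner_other c h1 h2, pvAInner_other c h1 h2]
        split_ifs with h3
        · rw [ih (pre ++ bs ++ [c]), ih ([] ++ bs ++ [c])]; simp
        · rw [ih (pre ++ [c]), ih ([] ++ [c])]; simp

theorem pvMain (cs : List Char) (q : Bool) :
    ∀ n, (pvAInner cs [] (List.replicate n '\\')).1 ++ (pvAInner cs [] (List.replicate n '\\')).2 ++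
        (if q then (pvAInner cs [] (List.replicate n '\\')).2 else [])
      = List.replicate (if (pvBody cs q).2 then 2 * n else n) '\\' ++ (pvBody cs q).1 := by
  induction cs with
  | nil =>
    intro n
    cases q
    · simp [pvAInner, pvBody]
    · simp only [pvAInner, pvBody, if_true]
      rw [two_mul, List.replicate_add]
      simp
  | cons c rest ih =>
    intro n
    by_cases h1 : c = '\\'
    · subst h1
      have hrep : (List.replicate n '\\' : List Char) ++ ['\\'] = List.replicate (n + 1) '\\' :=
        (List.replicate_succ').symm
      rw [pvAInner_bs, hrep, ih (n + 1), pvBody_bs]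
      rcases hd : (pvBody rest q).2
      · simp only [hd, Bool.false_eq_true, if_false, List.replicate_succ']
        simp
      · have h2 : 2 * (n + 1) = 2 * n + 2 := by ring
        simp only [hd, if_true, h2, List.replicate_add]
        simp [List.replicate_succ]
    · have hY := ih 0
      simp only [List.replicate_zero, mul_zero, ite_self, List.nil_append] at hY
      by_cases h2 : c = '"'
      · subst h2
        rw [pvAInner_quote, List.length_replicate, pvAInner_prefix, pvBody_quote]
        rw [← hY]
        simp [List.append_assoc]
      · rw [pvAInner_other c h1 h2, pvBody_other c h1 h2]
        have hres : (if (List.replicate n '\\' : List Char) ≠ [] then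
            ([] : List Char) ++ List.replicate n '\\' ++ [c] else [] ++ [c])
            = List.replicate n '\\' ++ [c] := by
          cases n <;> simp
        rw [hres, pvAInner_prefix, ← hY]
        simp [List.append_assoc, h1, h2]

theorem pvPiece_eq (arg : List Char) :
    pvAStep [] arg = pvBPiece arg := by
  have hY := pvMain arg (pvNeedquote arg) 0
  simp only [List.replicate_zero, mul_zero, ite_self, List.nil_append] at hY
  have hb := (pvBLoop_eq_pvBody arg (pvNeedquote arg)).1
  unfold pvAStep pvBPiece
  rcases hq : pvNeedquote arg <;> rw [hq] at hY hb <;>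
    simp only [hq, Bool.false_eq_true, if_false, if_true, ne_eq, not_true_eq_false,
      List.nil_append] <;> rw [hb] at * <;> simp only [if_true, Bool.false_eq_true, if_false] at hY
  · rw [← hY]
    split_ifs with h <;> simp_all
  · rw [pvAInner_prefix arg ['"'], ← hY]
    split_ifs with h <;> simp_all

theorem pvAStep_decomp (res arg : List Char) :
    pvAStep res arg = (if res ≠ [] then res ++ [' '] else res) ++ pvAStep [] arg := by
  unfold pvAStep
  rcases hq : pvNeedquote arg <;>
    simp only [hq, Bool.false_eq_true, if_false, if_true, ne_eq, not_true_eq_false,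
      List.nil_append]
  · rw [pvAInner_prefix arg (if ¬res = [] then res ++ [' '] else res),
      pvAInner_prefix arg []]
    split_ifs <;> simp_all
  · rw [pvAInner_prefix arg ((if ¬res = [] then res ++ [' '] else res) ++ ['"']),
      pvAInner_prefix arg ['"']]
    split_ifs <;> simp_all

theorem pvAStep_of_ne (res arg : List Char) (h : res ≠ []) :
    pvAStep res arg = res ++ ' ' :: pvBPiece arg := by
  rw [pvAStep_decomp, if_pos h, pvPiece_eq]; simp

theorem pvBPiece_ne_nil (arg : List Char) : pvBPiece arg ≠ [] := by
  unfold pvBPiece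
  rcases hq : pvNeedquote arg <;>
    simp only [hq, Bool.false_eq_true, if_false, if_true]
  · rw [(pvBLoop_eq_pvBody arg false).1]
    cases arg with
    | nil => exact absurd hq (by decide)
    | cons c rest =>
      by_cases h1 : c = '\\'
      · subst h1; rw [pvBody_bs]; split_ifs <;> simp
      · by_cases h2 : c = '"'
        · subst h2; rw [pvBody_quote]; simp
        · rw [pvBody_other c h1 h2]; simp
  · simp

theorem pvFold_ne (seq : List String) (res : List Char) (h : res ≠ []) :
    seq.foldl (fun r a => pvAStep r a.toList) res
      = res ++ seq.flatMap (fun a => ' ' :: pvBPiece a.toList) := by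
  induction seq generalizing res with
  | nil => simp
  | cons a rest ih =>
    simp only [List.foldl_cons, List.flatMap_cons]
    rw [pvAStep_of_ne res a.toList h, ih _ (by simp [h])]
    simp

theorem pvJoin_space (p : List Char) (ps : List (List Char)) :
    PySem.Chars.join [' '] (p :: ps) = p ++ ps.flatMap (fun a => ' ' :: a) := by
  induction ps generalizing p with
  | nil => simp [PySem.Chars.join, List.intercalate]
  | cons q qs ih =>
    rw [PySem.Chars.join_cons_cons, ih]
    simp

-- ===== VERDICT (by name: the statement is the Claim_ definition above) =====
theorem list2cmdline_spec : Claim_equal_list2cmdline := by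
  intro seq _
  show list2cmdline seq = list2cmdline_alt seq
  unfold list2cmdline list2cmdline_alt
  cases seq with
  | nil => simp [PySem.Chars.join, List.intercalate]
  | cons a rest =>
    simp only [List.foldl_cons, List.map_cons]
    rw [pvJoin_space, pvPiece_eq a.toList, pvFold_ne rest _ (pvBPiece_ne_nil a.toList)]
    congr 1
    simp [List.flatMap_map]
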